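-- pv_equiv track=rewrite | github.com/jaspreetdogra/coddy.tech | Python/Journey/05_Daily_Challenges/2025-10-08_pedestrain_counter_on_a_busy_street.py | count_pedestrians
-- ===== SOURCE A (Python) =====
-- def count_pedestrians(pedestrian_sequence, max_count):
--     # Initialize counters
--     adult_count = 0
--     elderly_count = 0
--     total_count = 0
--     reason = ""
--
--     # Iterate through each pedestrian in the sequence
--     for p in pedestrian_sequence:
--         # Skip children using 'continue'
--         if p == 'C':
--             continue
--
--         # If a stop sign is encountered, break the loop
--         if p == 'X':
--             reason = "Stop sign"
--             break
--
--         # Count adults and elderly pedestrians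
--         if p == 'A':
--             adult_count += 1
--         elif p == 'E':
--             elderly_count += 1
--
--         # Increase total pedestrians counted
--         total_count += 1
--
--         # If maximum count reached, stop counting
--         if total_count >= max_count:
--             reason = "Max reached"
--             break
--
--     # If loop finishes naturally without a stop sign or break,
--     # and we have not reached max count, we still consider it as max reached
--     if reason == "":
--         reason = "Max reached"
--
--     # Reverse the elderly count (as a string)
--     reversed_elderly = str(elderly_count)[::-1]
--
--     # Prepare the final result string
--     result = f"{adult_count},{reversed_elderly},{reason}"
--
--     return result
-- ===== SOURCE B (Python) =====
-- def count_pedestrians(pedestrian_sequence, max_count):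
--     # Different decomposition: filter children out, find the stop boundary k and
--     # the reason in one short scan, then tally the prefix with .count().
--     filtered = [p for p in pedestrian_sequence if p != 'C']
--     k = len(filtered)
--     reason = "Max reached"
--     total = 0
--     for i, p in enumerate(filtered):
--         if p == 'X':
--             k = i
--             reason = "Stop sign"
--             break
--         total += 1
--         if total >= max_count:
--             k = i + 1
--             break
--     prefix = filtered[:k]
--     adult_count = prefix.count('A')
--     elderly_count = prefix.count('E')
--     reversed_elderly = str(elderly_count)[::-1]
--     return f"{adult_count},{reversed_elderly},{reason}"
-- ===== Notes on version B (the rewrite author's own statement) =====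
-- stated objective: alternative
-- what changed: Replaces A's single fused loop carrying four mutable counters by a filter-out-children pass, a short scan that only finds the stop boundary k and reason, and a separate .count() tally over the prefix filtered[:k].
import Mathlib
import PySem

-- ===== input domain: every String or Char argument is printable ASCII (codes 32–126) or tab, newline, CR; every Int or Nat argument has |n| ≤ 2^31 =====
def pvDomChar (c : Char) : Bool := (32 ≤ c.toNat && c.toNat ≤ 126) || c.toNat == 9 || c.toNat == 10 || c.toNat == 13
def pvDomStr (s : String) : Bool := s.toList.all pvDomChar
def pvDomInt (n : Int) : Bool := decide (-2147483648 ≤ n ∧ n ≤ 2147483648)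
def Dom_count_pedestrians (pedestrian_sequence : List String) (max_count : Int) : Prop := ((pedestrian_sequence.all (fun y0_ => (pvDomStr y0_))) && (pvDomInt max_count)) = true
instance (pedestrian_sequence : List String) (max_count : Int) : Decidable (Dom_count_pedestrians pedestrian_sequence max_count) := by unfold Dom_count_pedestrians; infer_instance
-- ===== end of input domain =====

-- B replaces A's fused loop with filter → boundary scan → separate .count() tally (alternative decomposition, same cost).

-- ===== PORT A =====
-- A's for-loop with continue/break, carrying (adult, elderly, total) and a reason string ("" = no break / natural end).
def pvLoopA (m : Int) : List String → Int → Int → Int → (Int × Int × String)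
  | [], a, e, _ => (a, e, "")
  | p :: ps, a, e, t =>
    if p = "C" then pvLoopA m ps a e t
    else if p = "X" then (a, e, "Stop sign")
    else
      let a' := if p = "A" then a + 1 else a
      let e' := if p = "A" then e else if p = "E" then e + 1 else e
      let t' := t + 1
      if t' ≥ m then (a', e', "Max reached")
      else pvLoopA m ps a' e' t'

def count_pedestrians (pedestrian_sequence : List String) (max_count : Int) : String :=
  let r := pvLoopA max_count pedestrian_sequence 0 0 0
  let reason := if r.2.2 = "" then "Max reached" else r.2.2
  -- str(elderly_count)[::-1] : elderly_count ≥ 0, exact reversal of its decimal digits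
  let reversed_elderly := String.ofList ((PySem.Int.toStr r.2.1).toList.reverse)
  PySem.Int.toStr r.1 ++ "," ++ reversed_elderly ++ "," ++ reason

-- ===== PORT B =====
-- the boundary scan of Source B: first 'X' → (index, "Stop sign"); total reaching max_count → (index+1, "Max reached"); else (length, "Max reached")
def pvFindK (m : Int) : List String → Int → (Nat × String)
  | [], _ => (0, "Max reached")
  | p :: ps, t =>
    if p = "X" then (0, "Stop sign")
    else if t + 1 ≥ m then (1, "Max reached")
    else
      let kr := pvFindK m ps (t + 1)
      (kr.1 + 1, kr.2)

def count_pedestrians_alt (pedestrian_sequence : List String) (max_count : Int) : String :=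
  let filtered := pedestrian_sequence.filter (fun p => p ≠ "C")
  let kr := pvFindK max_count filtered 0
  let pre := filtered.take kr.1
  let adult_count : Int := pre.count "A"
  let elderly_count : Int := pre.count "E"
  let reversed_elderly := String.ofList ((PySem.Int.toStr elderly_count).toList.reverse)
  PySem.Int.toStr adult_count ++ "," ++ reversed_elderly ++ "," ++ kr.2

-- ===== PRECONDITION & SPEC =====
def Spec_count_pedestrians (pedestrian_sequence : List String) (max_count : Int) (out : String) : Prop := out = count_pedestrians_alt pedestrian_sequence max_count
instance (pedestrian_sequence : List String) (max_count : Int) (out : String) : Decidable (Spec_count_pedestrians pedestrian_sequence max_count out) := by unfold Spec_count_pedestrians; infer_instance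

-- ===== CLAIM (what is proved, stated in full; the proofs are below) =====
def Claim_equal_count_pedestrians : Prop := ∀ (pedestrian_sequence : List String) (max_count : Int), Dom_count_pedestrians pedestrian_sequence max_count → Spec_count_pedestrians pedestrian_sequence max_count (count_pedestrians pedestrian_sequence max_count)

-- ===== LEMMAS AND PROOFS =====

-- A's loop computes the same counts and (post-processed) reason as B's boundary scan + prefix tally.
theorem pvLoop_eq_find (m : Int) : ∀ (l : List String) (a e t : Int),
    (pvLoopA m l a e t).1
      = a + (((l.filter (fun p => p ≠ "C")).take (pvFindK m (l.filter (fun p => p ≠ "C")) t).1).count "A" : Int)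
    ∧ (pvLoopA m l a e t).2.1
      = e + (((l.filter (fun p => p ≠ "C")).take (pvFindK m (l.filter (fun p => p ≠ "C")) t).1).count "E" : Int)
    ∧ (if (pvLoopA m l a e t).2.2 = "" then "Max reached" else (pvLoopA m l a e t).2.2)
      = (pvFindK m (l.filter (fun p => p ≠ "C")) t).2 := by
  intro l
  induction l with
  | nil => intro a e t; simp [pvLoopA, pvFindK]
  | cons p ps ih =>
    intro a e t
    by_cases hC : p = "C"
    · have := ih a e t
      simp only [decide_not] at this
      simpa [pvLoopA, hC, List.filter] using this
    · by_cases hX : p = "X"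
      · simp [pvLoopA, pvFindK, hX, List.filter]
      · by_cases hM : t + 1 ≥ m
        · by_cases hA : p = "A"
          · simp [pvLoopA, pvFindK, hM, hA, List.filter]
          · by_cases hE : p = "E" <;>
              simp [pvLoopA, pvFindK, hC, hX, hM, hA, hE, List.filter]
        · have := ih (if p = "A" then a + 1 else a)
            (if p = "A" then e else if p = "E" then e + 1 else e) (t + 1)
          simp [pvLoopA, pvFindK, hC, hX, hM, List.filter, List.count_cons] at this ⊢
          refine ⟨?_, ?_, this.2.2⟩
          · by_cases hA : p = "A" <;> simp [hA] at this ⊢ <;> omega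
          · by_cases hA : p = "A"
            · simp [hA] at this ⊢; omega
            · by_cases hE : p = "E" <;> simp [hA, hE] at this ⊢ <;> omega

-- ===== VERDICT (by name: the statement is the Claim_ definition above) =====
theorem count_pedestrians_spec : Claim_equal_count_pedestrians := by
  intro seq m _
  unfold Spec_count_pedestrians count_pedestrians count_pedestrians_alt
  obtain ⟨h1, h2, h3⟩ := pvLoop_eq_find m seq 0 0 0
  simp only [zero_add] at h1 h2
  simp [h1, h2, h3]
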